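-- pv_equiv track=rewrite | github.com/aaa997/snake_board.py | ex2/shapes.py | factorial_list
-- ===== SOURCE A (Python) =====
-- def factorial_list(n):
--     lst = []
--     big_lst = []
--     for i in range(1, n+1):
--         lst.append(i)
--         big_lst.append(lst)
--         lst = lst[:]
--
--     return big_lst
-- ===== SOURCE B (Python) =====
-- def factorial_list(n):
--     full = list(range(1, n + 1))
--     return [full[:k] for k in range(1, n + 1)]
-- ===== Notes on version B (the rewrite author's own statement) =====
-- stated objective: simpler
-- what changed: B builds the full list [1..n] once and derives each row as an independent prefix slice full[:k], instead of A's interleaved append-then-copy loop maintaining a growing list.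
import Mathlib
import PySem

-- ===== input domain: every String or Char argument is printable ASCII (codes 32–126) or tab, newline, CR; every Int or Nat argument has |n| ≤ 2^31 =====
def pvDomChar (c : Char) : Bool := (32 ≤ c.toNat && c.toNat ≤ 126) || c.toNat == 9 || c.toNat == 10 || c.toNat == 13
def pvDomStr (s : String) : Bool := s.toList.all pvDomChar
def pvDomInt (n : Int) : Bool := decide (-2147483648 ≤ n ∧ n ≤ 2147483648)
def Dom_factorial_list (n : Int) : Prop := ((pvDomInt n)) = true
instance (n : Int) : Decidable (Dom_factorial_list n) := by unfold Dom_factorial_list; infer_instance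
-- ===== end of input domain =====

-- B builds the full list [1..n] once, then derives each row as a prefix slice full[:k]; simpler decomposition, same result.

-- ===== PORT A =====
-- A: one loop; lst grows by one element per step, a copy of lst is appended to big_lst each step.
def factorial_list (n : Int) : List (List Int) :=
  ((PySem.List.pyRange 1 (n + 1) 1).foldl
    (fun (st : List Int × List (List Int)) i =>
      let lst := st.1 ++ [i]
      (lst, st.2 ++ [lst]))
    ([], [])).2

-- ===== PORT B =====
-- B: full = list(range(1, n+1)); [full[:k] for k in range(1, n+1)]
def factorial_list_alt (n : Int) : List (List Int) :=
  let full := PySem.List.pyRange 1 (n + 1) 1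
  (PySem.List.pyRange 1 (n + 1) 1).map (fun k => PySem.List.slice full none (some k))

-- ===== PRECONDITION & SPEC =====
def Spec_factorial_list (n : Int) (out : List (List Int)) : Prop := out = factorial_list_alt n
instance (n : Int) (out : List (List Int)) : Decidable (Spec_factorial_list n out) := by unfold Spec_factorial_list; infer_instance

-- ===== CLAIM (what is proved, stated in full; the proofs are below) =====
def Claim_equal_factorial_list : Prop := ∀ (n : Int), Dom_factorial_list n → Spec_factorial_list n (factorial_list n)

-- ===== LEMMAS AND PROOFS =====

-- A's loop produces, from any start state, the old rows followed by one prefix row per element.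
theorem pv_foldA (xs : List Int) (l0 : List Int) (b0 : List (List Int)) :
    (List.foldl (fun (st : List Int × List (List Int)) i =>
        let lst := st.1 ++ [i]
        (lst, st.2 ++ [lst])) (l0, b0) xs).2
    = b0 ++ (List.range xs.length).map (fun k => l0 ++ xs.take (k + 1)) := by
  induction xs generalizing l0 b0 with
  | nil => simp
  | cons x xs ih =>
    simp only [List.foldl_cons, ih, List.length_cons, List.range_succ_eq_map,
      List.map_cons, List.map_map]
    simp [List.append_assoc, Function.comp]

theorem factorial_list_spec' (n : Int) : factorial_list n = factorial_list_alt n := by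
  unfold factorial_list factorial_list_alt
  rw [pv_foldA]
  simp only [PySem.List.pyRange_one, List.length_map, List.length_range, List.map_map,
    List.nil_append]
  apply List.map_congr_left
  intro k hk
  simp only [Function.comp_apply]
  have h1 : (1 : Int) + k = ((k + 1 : Nat) : Int) := by push_cast; ring
  rw [h1, PySem.List.slice_to_natCast]

-- ===== VERDICT (by name: the statement is the Claim_ definition above) =====
theorem factorial_list_spec : Claim_equal_factorial_list := by
  intro n _
  exact factorial_list_spec' n
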